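-- pv_equiv track=rewrite | github.com/chunshan160/Python | Hobay/Common/fengyong/tools/quchong.py | quchong
-- ===== SOURCE A (Python) =====
-- def quchong(list, a):
--     '''
--
--     :param list: 数据 list
--     :param a: 指定去重元素
--     :return: 去重后的结果
--     '''
--
--     new_list = []
--     # 把相同的存进new_list
--     for i in range(len(list)):
--         if list[i] == a and type(list[i]) == type(a):
--             new_list.append(i)
--
--     # 把相同的从list里面删除
--     for i in new_list[::-1]:
--         list.pop(i)
--
--     return list
-- ===== SOURCE B (Python) =====
-- def quchong(list, a):
--     # one forward pass with a write cursor, in-place compaction; same list object returned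
--     w = 0
--     for x in list:
--         if not (x == a and type(x) == type(a)):
--             list[w] = x
--             w += 1
--     del list[w:]
--     return list
-- ===== Notes on version B (the rewrite author's own statement) =====
-- stated objective: alternative
-- what changed: Replaced A's two passes (collect all matching indices, then pop each in reverse) by a single forward pass with a write cursor that compacts the list in place and truncates once.
import Mathlib
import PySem

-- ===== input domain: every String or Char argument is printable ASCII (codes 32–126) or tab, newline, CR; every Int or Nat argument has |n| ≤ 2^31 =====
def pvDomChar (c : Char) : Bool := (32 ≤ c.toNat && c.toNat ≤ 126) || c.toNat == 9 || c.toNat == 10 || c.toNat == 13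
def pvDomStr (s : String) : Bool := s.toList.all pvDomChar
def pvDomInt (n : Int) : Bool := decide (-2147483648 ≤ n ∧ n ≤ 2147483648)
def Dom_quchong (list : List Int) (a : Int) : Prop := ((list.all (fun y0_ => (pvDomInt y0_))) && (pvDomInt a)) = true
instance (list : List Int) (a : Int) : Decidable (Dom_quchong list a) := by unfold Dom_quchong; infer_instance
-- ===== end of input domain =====

-- B replaces A's collect-indices-then-pop-each-in-reverse removal by one forward pass with a
-- write cursor that compacts in place and truncates once (alternative algorithm). Both Pythons
-- mutate the argument list in place and return the same object; the equivalence proved here is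
-- about the returned value.

-- ===== PORT A =====
-- one pop step of 'list.pop(i)': on Int indices; the in-range case is the only one reached
def quchongPopStep (l : List Int) (i : Int) : List Int :=
  match PySem.List.pop? l i with
  | some (_, l') => l'
  | none => l

def quchong (list : List Int) (a : Int) : List Int :=
  -- for i in range(len(list)): if list[i] == a and type(list[i]) == type(a): new_list.append(i)
  -- (on a list of ints, type(list[i]) == type(a) is identically True)
  let new_list : List Int :=
    (PySem.List.pyRange 0 (list.length : Int) 1).foldl
      (fun acc i => if PySem.List.pyGetD list i 0 == a then acc ++ [i] else acc) []
  -- for i in new_list[::-1]: list.pop(i)   (new_list[::-1] is reverse: PySem.List.slice?_none_none_neg_one)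
  new_list.reverse.foldl quchongPopStep list

-- ===== PORT B =====
def quchong_alt (list : List Int) (a : Int) : List Int :=
  -- w = 0; for x in list: if not (x == a and ...): list[w] = x; w += 1
  -- (writes go only to already-read positions, so each x read is the original element)
  let st : List Int × Nat :=
    list.foldl
      (fun (st : List Int × Nat) x =>
        if !(x == a) then (st.1.set st.2 x, st.2 + 1) else st)
      (list, 0)
  -- del list[w:]; return list
  st.1.take st.2

-- ===== PRECONDITION & SPEC =====
def Spec_quchong (list : List Int) (a : Int) (out : List Int) : Prop := out = quchong_alt list a
instance (list : List Int) (a : Int) (out : List Int) : Decidable (Spec_quchong list a out) := by unfold Spec_quchong; infer_instance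

-- ===== CLAIM (what is proved, stated in full; the proofs are below) =====
def Claim_equal_quchong : Prop := ∀ (list : List Int) (a : Int), Dom_quchong list a → Spec_quchong list a (quchong list a)

-- ===== LEMMAS AND PROOFS =====

-- one pop step at a shifted nonnegative index leaves the head alone
lemma quchongPopStep_succ (x : Int) (l : List Int) (k : Nat) :
    quchongPopStep (x :: l) ((k : Int) + 1) = x :: quchongPopStep l (k : Int) := by
  by_cases h : k < l.length
  · have h1 : (k + 1 : Nat) < (x :: l).length := by simpa using Nat.succ_lt_succ h
    have e1 : ((k : Int) + 1) = ((k + 1 : Nat) : Int) := by push_cast; ring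
    rw [quchongPopStep, quchongPopStep, e1,
        PySem.List.pop?_natCast (x :: l) (k + 1) h1, PySem.List.pop?_natCast l k h]
    simp
  · have hk : l.length ≤ k := Nat.le_of_not_lt h
    have e1 : PySem.List.pop? (x :: l) ((k : Int) + 1) = none := by
      have h : PySem.List.pyIdx? (x :: l).length ((k : Int) + 1) = none := by
        simp only [PySem.List.pyIdx?, List.length_cons]
        rw [if_pos (by positivity), if_neg (by omega)]
      rw [PySem.List.pop?, h]; rfl
    have e2 : PySem.List.pop? l (k : Int) = none := by
      have h : PySem.List.pyIdx? l.length (k : Int) = none := by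
        simp only [PySem.List.pyIdx?]
        rw [if_pos (by positivity), if_neg (by omega)]
      rw [PySem.List.pop?, h]; rfl
    rw [quchongPopStep, quchongPopStep, e1, e2]

-- folding pop steps over indices all shifted by one leaves the head alone
lemma quchong_popFold_shift (x : Int) :
    ∀ (J : List Int) (l : List Int), (∀ j ∈ J, 0 ≤ j) →
      (J.map (· + 1)).foldl quchongPopStep (x :: l) = x :: J.foldl quchongPopStep l := by
  intro J
  induction J with
  | nil => intro l _; simp
  | cons j J ih =>
    intro l hJ
    have hj : 0 ≤ j := hJ j (by simp)
    obtain ⟨k, rfl⟩ : ∃ k : Nat, j = (k : Int) := ⟨j.toNat, (Int.toNat_of_nonneg hj).symm⟩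
    simp only [List.map_cons, List.foldl_cons]
    rw [quchongPopStep_succ]
    exact ih _ (fun j hjm => hJ j (by simp [hjm]))

-- the collected index list, in closed form (the first loop is an append-if fold)
lemma quchong_newlist_eq (list : List Int) (a : Int) :
    (PySem.List.pyRange 0 (list.length : Int) 1).foldl
        (fun acc i => if PySem.List.pyGetD list i 0 == a then acc ++ [i] else acc) []
      = (PySem.List.pyRange 0 (list.length : Int) 1).filter
          (fun i => PySem.List.pyGetD list i 0 == a) := by
  simpa using PySem.List.foldl_append_if
    (fun i => PySem.List.pyGetD list i 0 == a) id
    (PySem.List.pyRange 0 (list.length : Int) 1) []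

-- A computes the filter: popping the collected indices back-to-front removes exactly the hits
lemma quchong_eq_filter : ∀ (list : List Int) (a : Int),
    quchong list a = list.filter (fun x => !(x == a)) := by
  intro list a
  induction list with
  | nil => simp [quchong, PySem.List.pyRange]
  | cons x xs ih =>
    have hlen : ((x :: xs).length : Int) = (xs.length : Int) + 1 := by simp
    -- the index range splits as 0 :: (range of tail indices shifted by one)
    have hrange : PySem.List.pyRange 0 ((x :: xs).length : Int) 1
        = 0 :: (PySem.List.pyRange 0 (xs.length : Int) 1).map (· + 1) := by
      rw [hlen, PySem.List.pyRange_one_cons (by positivity), PySem.List.pyRange_one,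
          PySem.List.pyRange_one]
      simp [Int.add_comm]
    have hshiftGet : ∀ i ∈ PySem.List.pyRange 0 (xs.length : Int) 1,
        PySem.List.pyGetD (x :: xs) (i + 1) 0 = PySem.List.pyGetD xs i 0 := by
      intro i hi
      have hi0 : 0 ≤ i := ((PySem.List.mem_pyRange_one).1 hi).1
      obtain ⟨k, rfl⟩ : ∃ k : Nat, i = (k : Int) := ⟨i.toNat, (Int.toNat_of_nonneg hi0).symm⟩
      have e1 : ((k : Int) + 1) = ((k + 1 : Nat) : Int) := by push_cast; ring
      rw [e1, PySem.List.pyGetD_natCast, PySem.List.pyGetD_natCast]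
      simp
    -- the collected indices for x :: xs
    have hnew :
        (PySem.List.pyRange 0 ((x :: xs).length : Int) 1).filter
            (fun i => PySem.List.pyGetD (x :: xs) i 0 == a)
          = (if x == a then [0] else [])
            ++ ((PySem.List.pyRange 0 (xs.length : Int) 1).filter
                  (fun i => PySem.List.pyGetD xs i 0 == a)).map (· + 1) := by
      rw [hrange]
      rw [List.filter_cons]
      have hseg : ((PySem.List.pyRange 0 (xs.length : Int) 1).map (· + 1)).filter
            (fun i => PySem.List.pyGetD (x :: xs) i 0 == a)
          = ((PySem.List.pyRange 0 (xs.length : Int) 1).filter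
                (fun i => PySem.List.pyGetD xs i 0 == a)).map (· + 1) := by
        rw [List.filter_map]
        congr 1
        apply List.filter_congr
        intro i hi
        simp [hshiftGet i hi]
      rw [hseg]
      by_cases hx : x == a
      · simp [hx, PySem.List.pyGetD]
      · simp [hx, PySem.List.pyGetD]
    have hpos : ∀ j ∈ (PySem.List.pyRange 0 (xs.length : Int) 1).filter
        (fun i => PySem.List.pyGetD xs i 0 == a), 0 ≤ j := by
      intro j hj
      exact ((PySem.List.mem_pyRange_one).1 (List.mem_of_mem_filter hj)).1
    have ihA : quchong xs a = xs.filter (fun x => !(x == a)) := ih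
    rw [quchong] at ihA ⊢
    rw [quchong_newlist_eq] at ihA ⊢
    rw [hnew, List.reverse_append, ← List.map_reverse, List.foldl_append]
    rw [quchong_popFold_shift x _ xs
          (fun j hj => hpos j (List.mem_reverse.1 hj)), ihA]
    by_cases hx : x == a
    · simp only [hx]
      simp [quchongPopStep, PySem.List.pop?_zero_cons, hx]
    · simp [hx]

-- B's write-cursor loop invariant: after consuming s, the buffer is
-- already-kept ++ kept-of-s ++ untouched tail, and the cursor counts the kept elements
lemma quchong_alt_inv (a : Int) :
    ∀ (s F rest : List Int), s.length ≤ rest.length →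
      s.foldl
          (fun (st : List Int × Nat) x =>
            if !(x == a) then (st.1.set st.2 x, st.2 + 1) else st)
          (F ++ rest, F.length)
        = (F ++ s.filter (fun x => !(x == a))
             ++ rest.drop (s.filter (fun x => !(x == a))).length,
           F.length + (s.filter (fun x => !(x == a))).length) := by
  intro s
  induction s with
  | nil => intro F rest _; simp
  | cons x s ih =>
    intro F rest hle
    simp only [List.foldl_cons]
    by_cases hx : x == a
    · rw [if_neg (by simp [hx])]
      rw [ih F rest (by simpa using Nat.le_of_succ_le hle)]
      simp [hx]
    · obtain ⟨r, rest', rfl⟩ : ∃ r rest', rest = r :: rest' := by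
        cases rest with
        | nil => simp at hle
        | cons r rest' => exact ⟨r, rest', rfl⟩
      rw [if_pos (by simp [hx])]
      have hset : (F ++ r :: rest').set F.length x = (F ++ [x]) ++ rest' := by
        rw [List.set_append_right _ _ (Nat.le_refl _)]
        simp
      have hlen' : (F ++ [x]).length = F.length + 1 := by simp
      rw [hset, show F.length + 1 = (F ++ [x]).length from hlen'.symm,
          ih (F ++ [x]) rest' (by simpa using Nat.le_of_succ_le_succ hle)]
      simp [hx]
      omega

-- B computes the filter too
lemma quchong_alt_eq_filter (list : List Int) (a : Int) :
    quchong_alt list a = list.filter (fun x => !(x == a)) := by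
  rw [quchong_alt]
  have h := quchong_alt_inv a list [] list (Nat.le_refl _)
  simp only [List.nil_append, List.length_nil] at h
  rw [h]
  simp [List.take_left']

-- ===== VERDICT (by name: the statement is the Claim_ definition above) =====
theorem quchong_spec : Claim_equal_quchong := by
  intro list a _
  unfold Spec_quchong
  rw [quchong_eq_filter, quchong_alt_eq_filter]
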